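-- pv_equiv track=rewrite | github.com/zaidishahbaz/green-agent | src/container_executor.py | _contains_blocked_path
-- ===== SOURCE A (Python) =====
-- BLOCKED_PATHS = (
--     "/tmp",
--     "/var/tmp",
--     "/etc",
--     "/root",
--     "/home",
--     "/proc",
--     "/sys",
--     "/dev",
--     "/run",
--     "/var/log",
-- )
--
-- def _contains_blocked_path(command: str) -> str | None:
--     """Check if command tries to access blocked system paths.
--
--     Returns the blocked path if found, None otherwise.
--     """
--     for blocked in BLOCKED_PATHS:
--         # Check for absolute paths to blocked directories
--         if blocked in command:
--             # Make sure it's actually a path reference, not just a substring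
--             # e.g., "pytest" shouldn't trigger on "/tmp" being in command
--             patterns = [
--                 f" {blocked}",      # space before (argument)
--                 f" {blocked}/",     # path with subdir
--                 f"'{blocked}",      # quoted path
--                 f'"{blocked}',      # double-quoted path
--                 f">{blocked}",      # redirect to
--                 f"<{blocked}",      # redirect from
--                 f"cat {blocked}",   # explicit cat
--                 f"ls {blocked}",    # explicit ls
--             ]
--             if command.startswith(blocked) or any(p in command for p in patterns):
--                 return blocked
--     return None
-- ===== SOURCE B (Python) =====
-- BLOCKED_PATHS = (
--     "/tmp",
--     "/var/tmp",
--     "/etc",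
--     "/root",
--     "/home",
--     "/proc",
--     "/sys",
--     "/dev",
--     "/run",
--     "/var/log",
-- )
--
-- # B: per-position scan — a blocked path counts when the command starts with it, or it
-- # occurs preceded by one of the five delimiter characters (space, single quote,
-- # double quote, greater-than, less-than); the slash, cat and ls variants of A's
-- # pattern list are subsumed by the space case.
-- def _contains_blocked_path(command):
--     for blocked in BLOCKED_PATHS:
--         if command.startswith(blocked):
--             return blocked
--         for i in range(1, len(command)):
--             if command[i - 1] in " '\"><" and command[i:].startswith(blocked):
--                 return blocked
--     return None
-- ===== Notes on version B (the rewrite author's own statement) =====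
-- stated objective: simpler
-- what changed: Replaces A's per-path substring-containment guard plus eight concatenated-pattern any() scan by a single per-position scan: the path matches iff the command starts with it or it occurs preceded by one of the five delimiter characters (space, single quote, double quote, greater-than, less-than); the slash, cat and ls pattern variants are subsumed by the space case.
import Mathlib
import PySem

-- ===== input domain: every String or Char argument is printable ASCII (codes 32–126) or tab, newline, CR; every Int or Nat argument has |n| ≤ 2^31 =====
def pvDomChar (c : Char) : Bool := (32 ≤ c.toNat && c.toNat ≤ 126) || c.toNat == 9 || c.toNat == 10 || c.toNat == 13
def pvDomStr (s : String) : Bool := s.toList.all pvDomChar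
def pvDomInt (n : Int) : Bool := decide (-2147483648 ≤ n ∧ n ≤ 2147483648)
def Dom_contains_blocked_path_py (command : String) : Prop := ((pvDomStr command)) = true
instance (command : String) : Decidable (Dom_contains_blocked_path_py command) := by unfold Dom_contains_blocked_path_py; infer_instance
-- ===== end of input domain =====

-- B replaces A's per-path eight-substring-pattern any() by a single per-position scan:
-- the path matches iff the command starts with it or it occurs preceded by one of the five
-- delimiter characters (space, single quote, double quote, greater-than, less-than);
-- objective: simpler — the slash, cat and ls pattern variants are subsumed by the space case.

-- ===== PORT A =====
def pvBlockedPaths : List String :=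
  ["/tmp", "/var/tmp", "/etc", "/root", "/home", "/proc", "/sys", "/dev", "/run", "/var/log"]

def pvALoop (command : String) : List String → Option String
  | [] => none
  | blocked :: rest =>
    if PySem.Str.isIn blocked command then
      let patterns : List String :=
        [" " ++ blocked, " " ++ blocked ++ "/", "'" ++ blocked, "\"" ++ blocked,
         ">" ++ blocked, "<" ++ blocked, "cat " ++ blocked, "ls " ++ blocked]
      if PySem.Str.startswith command blocked
          || patterns.any (fun p => PySem.Str.isIn p command) then
        some blocked
      else pvALoop command rest
    else pvALoop command rest

def contains_blocked_path_py (command : String) : Option String :=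
  pvALoop command pvBlockedPaths

-- ===== PORT B =====
-- inner loop of B: some i in range(1, len(command)) has command[i-1] a delimiter and command[i:] starting with blocked
def pvBInner (command : String) (blocked : String) : Bool :=
  (PySem.List.pyRange 1 (PySem.Str.len command) 1).any (fun i =>
    (match PySem.Str.pyGet? command (i - 1) with
     | some c => PySem.Str.isIn (String.ofList [c]) " '\"><"
     | none => false)   -- i - 1 is always in range inside the loop
    && PySem.Str.startswith (PySem.Str.slice command (some i) none) blocked)

def pvBLoop (command : String) : List String → Option String
  | [] => none
  | blocked :: rest =>
    if PySem.Str.startswith command blocked then some blocked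
    else if pvBInner command blocked then some blocked
    else pvBLoop command rest

def contains_blocked_path_py_alt (command : String) : Option String :=
  pvBLoop command pvBlockedPaths

-- ===== PRECONDITION & SPEC =====
def Spec_contains_blocked_path_py (command : String) (out : Option String) : Prop := out = contains_blocked_path_py_alt command
instance (command : String) (out : Option String) : Decidable (Spec_contains_blocked_path_py command out) := by unfold Spec_contains_blocked_path_py; infer_instance

-- ===== CLAIM (what is proved, stated in full; the proofs are below) =====
def Claim_equal_contains_blocked_path_py : Prop := ∀ (command : String), Dom_contains_blocked_path_py command → Spec_contains_blocked_path_py command (contains_blocked_path_py command)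

-- ===== LEMMAS AND PROOFS =====

-- the five delimiter characters of B's scan
def pvDelims : List Char := [' ', '\'', '"', '>', '<']

-- "blocked (as a char list bs) occurs in cs at position i ≥ 1 preceded by c"
def pvOcc (c : Char) (bs cs : List Char) : Prop :=
  ∃ i : Nat, 1 ≤ i ∧ i < cs.length ∧ cs[i-1]? = some c ∧ bs <+: cs.drop i

theorem pv_cons_prefix_iff (c : Char) (l1 l2 : List Char) :
    c :: l1 <+: l2 ↔ l2[0]? = some c ∧ l1 <+: l2.tail := by
  cases l2 with
  | nil => simp
  | cons h t => simp [List.cons_prefix_cons, eq_comm]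

theorem pv_isIn_cons_iff (c : Char) (bs cs : List Char) (hb : bs ≠ []) :
    PySem.Chars.isIn (c :: bs) cs = true ↔ pvOcc c bs cs := by
  rw [← PySem.Chars.exists_prefix_drop_iff_isIn]
  constructor
  · rintro ⟨j, hj⟩
    rw [pv_cons_prefix_iff, List.tail_drop] at hj
    obtain ⟨h1, h2⟩ := hj
    have hne : cs.drop (j+1) ≠ [] := fun h => hb (List.prefix_nil.mp (h ▸ h2))
    have hlt : j + 1 < cs.length := by
      by_contra h
      exact hne (List.drop_eq_nil_of_le (by omega))
    exact ⟨j + 1, by omega, hlt, by simpa using h1, h2⟩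
  · rintro ⟨i, h1, h2, h3, h4⟩
    refine ⟨i - 1, ?_⟩
    rw [pv_cons_prefix_iff, List.tail_drop]
    have hi : i - 1 + 1 = i := by omega
    rw [hi]
    exact ⟨by simpa using h3, h4⟩

theorem pv_isIn_singleton_iff (c : Char) (l : List Char) :
    PySem.Chars.isIn [c] l = true ↔ c ∈ l := by
  rw [← PySem.Chars.exists_prefix_drop_iff_isIn]
  constructor
  · rintro ⟨j, hj⟩
    rw [pv_cons_prefix_iff] at hj
    exact List.mem_of_getElem? (by simpa using hj.1)
  · intro h
    obtain ⟨j, hjl, hj⟩ := List.mem_iff_getElem.mp h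
    refine ⟨j, ?_⟩
    rw [pv_cons_prefix_iff]
    constructor
    · simp [List.getElem?_eq_getElem hjl, hj]
    · simp

theorem pv_isIn_mono (p q cs : List Char) (h : p <:+: q) :
    PySem.Chars.isIn q cs = true → PySem.Chars.isIn p cs = true := by
  rw [PySem.Chars.isIn_iff_infix, PySem.Chars.isIn_iff_infix]
  exact fun hq => h.trans hq

theorem pv_occ_isIn (c : Char) (bs cs : List Char) (h : pvOcc c bs cs) :
    PySem.Chars.isIn bs cs = true := by
  obtain ⟨i, _, _, _, h4⟩ := h
  rw [← PySem.Chars.exists_prefix_drop_iff_isIn]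
  exact ⟨i, h4⟩

theorem pv_sw_isIn (bs cs : List Char) (h : bs <+: cs) :
    PySem.Chars.isIn bs cs = true := by
  rw [← PySem.Chars.exists_prefix_drop_iff_isIn]
  exact ⟨0, by simpa using h⟩

-- A's eight-pattern any() collapses to "some delimiter-preceded occurrence"
theorem pv_patAny_iff (command blocked : String) (hb : blocked.toList ≠ []) :
    ([" " ++ blocked, " " ++ blocked ++ "/", "'" ++ blocked, "\"" ++ blocked,
      ">" ++ blocked, "<" ++ blocked, "cat " ++ blocked, "ls " ++ blocked].any
        (fun p => PySem.Str.isIn p command)) = true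
    ↔ ∃ c ∈ pvDelims, pvOcc c blocked.toList command.toList := by
  have hsp : (" " ++ blocked).toList = ' ' :: blocked.toList := by simp
  have hq1 : ("'" ++ blocked).toList = '\'' :: blocked.toList := by simp
  have hq2 : ("\"" ++ blocked).toList = '"' :: blocked.toList := by simp
  have hgt : (">" ++ blocked).toList = '>' :: blocked.toList := by simp
  have hlt : ("<" ++ blocked).toList = '<' :: blocked.toList := by simp
  have hsl : (" " ++ blocked ++ "/").toList = (' ' :: blocked.toList) ++ ['/'] := by simp
  have hcat : ("cat " ++ blocked).toList = ['c','a','t'] ++ (' ' :: blocked.toList) := by simp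
  have hls : ("ls " ++ blocked).toList = ['l','s'] ++ (' ' :: blocked.toList) := by simp
  constructor
  · intro h
    simp only [List.any_cons, List.any_nil, Bool.or_eq_true, Bool.or_false] at h
    simp only [PySem.Str.isIn_eq] at h
    rcases h with h | h | h | h | h | h | h | h
    · exact ⟨' ', by simp [pvDelims], (pv_isIn_cons_iff _ _ _ hb).mp (hsp ▸ h)⟩
    · refine ⟨' ', by simp [pvDelims], (pv_isIn_cons_iff _ _ _ hb).mp ?_⟩
      exact pv_isIn_mono _ _ _ (List.IsPrefix.isInfix ⟨['/'], rfl⟩) (hsl ▸ h)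
    · exact ⟨'\'', by simp [pvDelims], (pv_isIn_cons_iff _ _ _ hb).mp (hq1 ▸ h)⟩
    · exact ⟨'"', by simp [pvDelims], (pv_isIn_cons_iff _ _ _ hb).mp (hq2 ▸ h)⟩
    · exact ⟨'>', by simp [pvDelims], (pv_isIn_cons_iff _ _ _ hb).mp (hgt ▸ h)⟩
    · exact ⟨'<', by simp [pvDelims], (pv_isIn_cons_iff _ _ _ hb).mp (hlt ▸ h)⟩
    · exact ⟨' ', by simp [pvDelims], (pv_isIn_cons_iff _ _ _ hb).mp
        (pv_isIn_mono _ _ _ (List.IsSuffix.isInfix ⟨['c','a','t'], rfl⟩) (hcat ▸ h))⟩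
    · exact ⟨' ', by simp [pvDelims], (pv_isIn_cons_iff _ _ _ hb).mp
        (pv_isIn_mono _ _ _ (List.IsSuffix.isInfix ⟨['l','s'], rfl⟩) (hls ▸ h))⟩
  · rintro ⟨c, hc, hocc⟩
    simp only [List.any_cons, List.any_nil, Bool.or_eq_true, Bool.or_false]
    simp only [PySem.Str.isIn_eq]
    have hin := (pv_isIn_cons_iff c _ _ hb).mpr hocc
    fin_cases hc
    · exact Or.inl (hsp ▸ hin)
    · exact Or.inr (Or.inr (Or.inl (hq1 ▸ hin)))
    · exact Or.inr (Or.inr (Or.inr (Or.inl (hq2 ▸ hin))))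
    · exact Or.inr (Or.inr (Or.inr (Or.inr (Or.inl (hgt ▸ hin)))))
    · exact Or.inr (Or.inr (Or.inr (Or.inr (Or.inr (Or.inl (hlt ▸ hin))))))

-- B's positional scan finds exactly the delimiter-preceded occurrences
theorem pv_BInner_iff (command blocked : String) :
    pvBInner command blocked = true
    ↔ ∃ c ∈ pvDelims, pvOcc c blocked.toList command.toList := by
  unfold pvBInner
  rw [List.any_eq_true]
  constructor
  · rintro ⟨i, hmem, hf⟩
    rw [PySem.List.mem_pyRange_one] at hmem
    have hlen : PySem.Str.len command = (command.toList.length : Int) := by simp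
    rw [hlen] at hmem
    obtain ⟨k, hk⟩ : ∃ k : Nat, i = (k : Int) + 1 := ⟨(i - 1).toNat, by omega⟩
    subst hk
    have hklt : k + 1 < command.toList.length := by omega
    rw [Bool.and_eq_true] at hf
    obtain ⟨hch, hpre⟩ := hf
    have hg : PySem.Str.pyGet? command ((k : Int) + 1 - 1) = command.toList[k]? := by
      have : (k : Int) + 1 - 1 = (k : Int) := by omega
      rw [this]; simp
    rw [hg] at hch
    have hk? : command.toList[k]? = some (command.toList[k]'(by omega)) :=
      List.getElem?_eq_getElem (by omega)
    rw [hk?] at hch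
    set c := command.toList[k]'(by omega) with hc
    have hch' : PySem.Str.isIn (String.ofList [c]) " '\"><" = true := hch
    have hcd : c ∈ pvDelims := by
      rw [PySem.Str.isIn_eq] at hch'
      have := (pv_isIn_singleton_iff c (" '\"><".toList)).mp (by simpa using hch')
      simpa [pvDelims] using this
    have hdrop : blocked.toList <+: command.toList.drop (k + 1) := by
      rw [PySem.Str.startswith_eq, PySem.Chars.startswith_iff] at hpre
      have hsl : (PySem.Str.slice command (some ((k : Int) + 1)) none).toList
          = command.toList.drop (k + 1) := by
        have h1 : (PySem.Str.slice command (some ((k : Int) + 1)) none).toList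
            = PySem.List.slice command.toList (some ((k : Int) + 1)) none := by simp
        rw [h1, PySem.List.slice_from _ (by omega : (0:Int) ≤ (k:Int)+1)]
        have hn : ((k:Int)+1).toNat = k+1 := by omega
        rw [hn]
      rwa [hsl] at hpre
    exact ⟨c, hcd, k + 1, by omega, hklt, by simpa using hk?, hdrop⟩
  · rintro ⟨c, hc, i, h1, h2, h3, h4⟩
    refine ⟨(i : Int), ?_, ?_⟩
    · rw [PySem.List.mem_pyRange_one]
      have hlen : PySem.Str.len command = (command.toList.length : Int) := by simp
      rw [hlen]
      omega
    · rw [Bool.and_eq_true]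
      constructor
      · have hg : PySem.Str.pyGet? command ((i : Int) - 1) = command.toList[i-1]? := by
          have : (i : Int) - 1 = ((i - 1 : Nat) : Int) := by omega
          rw [this]; simp
        rw [hg, h3]
        show PySem.Str.isIn (String.ofList [c]) " '\"><" = true
        rw [PySem.Str.isIn_eq]
        have := (pv_isIn_singleton_iff c (" '\"><".toList)).mpr (by simpa [pvDelims] using hc)
        simpa using this
      · rw [PySem.Str.startswith_eq, PySem.Chars.startswith_iff]
        have hsl : (PySem.Str.slice command (some (i : Int)) none).toList
            = command.toList.drop i := by
          have h1 : (PySem.Str.slice command (some (i : Int)) none).toList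
              = PySem.List.slice command.toList (some (i : Int)) none := by simp
          rw [h1, PySem.List.slice_from _ (by omega : (0:Int) ≤ (i:Int))]
          have hn : ((i:Int)).toNat = i := by omega
          rw [hn]
        rwa [hsl]

-- one step of the two loops agrees
theorem pv_step (command blocked : String) (hb : blocked.toList ≠ []) (r : Option String) :
    (if PySem.Str.isIn blocked command then
      (if PySem.Str.startswith command blocked
          || ([" " ++ blocked, " " ++ blocked ++ "/", "'" ++ blocked, "\"" ++ blocked,
              ">" ++ blocked, "<" ++ blocked, "cat " ++ blocked, "ls " ++ blocked].any
                (fun p => PySem.Str.isIn p command)) then some blocked else r)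
      else r)
    = (if PySem.Str.startswith command blocked then some blocked
       else if pvBInner command blocked then some blocked else r) := by
  by_cases h3 : PySem.Str.startswith command blocked = true
  · have h1 : PySem.Str.isIn blocked command = true := by
      rw [PySem.Str.isIn_eq]
      exact pv_sw_isIn _ _ ((PySem.Chars.startswith_iff _ _).mp (by simpa using h3))
    have h2 : (PySem.Str.startswith command blocked
        || ([" " ++ blocked, " " ++ blocked ++ "/", "'" ++ blocked, "\"" ++ blocked,
            ">" ++ blocked, "<" ++ blocked, "cat " ++ blocked, "ls " ++ blocked].any
              (fun p => PySem.Str.isIn p command))) = true := by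
      rw [h3, Bool.true_or]
    rw [if_pos h1, if_pos h2, if_pos h3]
  · by_cases h4 : pvBInner command blocked = true
    · obtain ⟨c, hc, hocc⟩ := (pv_BInner_iff command blocked).mp h4
      have hany := (pv_patAny_iff command blocked hb).mpr ⟨c, hc, hocc⟩
      have h1 : PySem.Str.isIn blocked command = true := by
        rw [PySem.Str.isIn_eq]
        exact pv_occ_isIn c _ _ hocc
      have h2 : (PySem.Str.startswith command blocked
          || ([" " ++ blocked, " " ++ blocked ++ "/", "'" ++ blocked, "\"" ++ blocked,
              ">" ++ blocked, "<" ++ blocked, "cat " ++ blocked, "ls " ++ blocked].any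
                (fun p => PySem.Str.isIn p command))) = true := by
        rw [hany, Bool.or_true]
      rw [if_pos h1, if_pos h2, if_neg h3, if_pos h4]
    · have hany : ([" " ++ blocked, " " ++ blocked ++ "/", "'" ++ blocked, "\"" ++ blocked,
          ">" ++ blocked, "<" ++ blocked, "cat " ++ blocked, "ls " ++ blocked].any
            (fun p => PySem.Str.isIn p command)) = false := by
        rw [Bool.eq_false_iff]
        intro h
        exact h4 ((pv_BInner_iff command blocked).mpr ((pv_patAny_iff command blocked hb).mp h))
      have hsw0 : PySem.Str.startswith command blocked = false := Bool.eq_false_iff.mpr h3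
      have h2 : ¬ ((PySem.Str.startswith command blocked
          || ([" " ++ blocked, " " ++ blocked ++ "/", "'" ++ blocked, "\"" ++ blocked,
              ">" ++ blocked, "<" ++ blocked, "cat " ++ blocked, "ls " ++ blocked].any
                (fun p => PySem.Str.isIn p command))) = true) := by
        rw [hsw0, hany, Bool.or_false]
        simp
      by_cases h1 : PySem.Str.isIn blocked command = true
      · rw [if_pos h1, if_neg h2, if_neg h3, if_neg h4]
      · rw [if_neg h1, if_neg h3, if_neg h4]

theorem pv_loop_eq (command : String) (l : List String) (hl : ∀ b ∈ l, b.toList ≠ []) :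
    pvALoop command l = pvBLoop command l := by
  induction l with
  | nil => rfl
  | cons b rest ih =>
    have hb := hl b (List.mem_cons_self ..)
    have hrest : ∀ x ∈ rest, x.toList ≠ [] := fun x hx => hl x (List.mem_cons_of_mem _ hx)
    simp only [pvALoop, pvBLoop]
    rw [ih hrest]
    exact pv_step command b hb (pvBLoop command rest)

-- ===== VERDICT (by name: the statement is the Claim_ definition above) =====
theorem contains_blocked_path_py_spec : Claim_equal_contains_blocked_path_py := by
  intro command _
  show contains_blocked_path_py command = contains_blocked_path_py_alt command
  unfold contains_blocked_path_py contains_blocked_path_py_alt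
  apply pv_loop_eq
  intro b hb
  fin_cases hb <;> decide
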